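-- pv_equiv track=rewrite | github.com/ankitshah009/leetcode_python | graphs/1807-evaluate_the_bracket_pairs_of_a_string.py | evaluate
-- ===== SOURCE A (Python) =====
-- from typing import List
--
-- def evaluate(s: str, knowledge: List[List[str]]) -> str:
--     """
--     Build dict from knowledge and parse string.
--     """
--     lookup = {key: value for key, value in knowledge}
--     result = []
--     i = 0
--
--     while i < len(s):
--         if s[i] == '(':
--             # Find closing bracket
--             j = i + 1
--             while s[j] != ')':
--                 j += 1
--             key = s[i+1:j]
--             result.append(lookup.get(key, '?'))
--             i = j + 1
--         else:
--             result.append(s[i])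
--             i += 1
--
--     return ''.join(result)
-- ===== SOURCE B (Python) =====
-- def evaluate(s, knowledge):
--     lookup = dict(knowledge)
--     out = []
--     i = 0
--     while True:
--         open_ = s.find('(', i)
--         if open_ == -1:
--             out.append(s[i:])
--             break
--         close = s.index(')', open_)
--         out.append(s[i:open_])
--         out.append(lookup.get(s[open_ + 1:close], '?'))
--         i = close + 1
--     return ''.join(out)
-- ===== Notes on version B (the rewrite author's own statement) =====
-- stated objective: idiomatic
-- what changed: B replaces A's per-character while loop with its manual inner closing-bracket scan by chunk-wise processing: dict(knowledge) plus str.find/str.index jumps that copy whole slices between brackets and substitute each key in one step.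
import Mathlib
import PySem

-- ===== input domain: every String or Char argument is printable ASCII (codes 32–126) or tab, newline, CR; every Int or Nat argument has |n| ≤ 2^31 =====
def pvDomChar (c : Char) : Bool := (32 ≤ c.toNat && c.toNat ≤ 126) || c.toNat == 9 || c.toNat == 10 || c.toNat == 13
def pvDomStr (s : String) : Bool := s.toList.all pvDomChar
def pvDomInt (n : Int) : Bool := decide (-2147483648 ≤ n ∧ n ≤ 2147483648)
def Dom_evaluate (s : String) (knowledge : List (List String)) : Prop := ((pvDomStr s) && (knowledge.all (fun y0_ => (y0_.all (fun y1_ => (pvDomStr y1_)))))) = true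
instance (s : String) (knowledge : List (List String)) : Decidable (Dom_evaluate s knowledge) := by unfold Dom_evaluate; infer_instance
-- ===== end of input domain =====

-- B replaces A's per-character scan (with a manual inner search for ')') by chunk-wise
-- find/index jumps over the string; equal return values on well-formed inputs (Pre_).

-- ===== PORT A =====
-- lookup = {key: value for key, value in knowledge}; a row of length ≠ 2 raises (outside Pre_)
def evalBuildA (knowledge : List (List String)) : PySem.Dict String String :=
  knowledge.foldl (fun d row =>
    match row with
    | [k, v] => d.insert k v
    | _ => d) PySem.Dict.empty

-- inner loop 'j = i+1; while s[j] != ')': j += 1; key = s[i+1:j]', applied to the chars after '(':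
-- returns (the key chars, the chars after the ')'); none = IndexError (outside Pre_)
def evalScanA : List Char → Option (List Char × List Char)
  | [] => none
  | c :: cs =>
    if c = ')' then some ([], cs)
    else
      match evalScanA cs with
      | none => none
      | some (k, r) => some (c :: k, r)

theorem evalScanA_length : ∀ (cs k r : List Char), evalScanA cs = some (k, r) → r.length < cs.length := by
  intro cs
  induction cs with
  | nil => intro k r h; simp [evalScanA] at h
  | cons c cs ih =>
    intro k r h
    rw [evalScanA] at h
    by_cases hc : c = ')'
    · rw [if_pos hc] at h
      simp only [Option.some.injEq, Prod.mk.injEq] at h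
      rw [← h.2, List.length_cons]
      omega
    · rw [if_neg hc] at h
      cases hs : evalScanA cs with
      | none => rw [hs] at h; exact absurd h (by simp)
      | some kr =>
        obtain ⟨k', r'⟩ := kr
        rw [hs] at h
        simp only [Option.some.injEq, Prod.mk.injEq] at h
        have := ih k' r' hs
        rw [← h.2, List.length_cons]
        omega

-- the outer 'while i < len(s)' loop, building the list 'result'
def evalLoopA (d : PySem.Dict String String) : List Char → List String
  | [] => []
  | c :: cs =>
    if c = '(' then
      match h : evalScanA cs with
      | none => []   -- IndexError in Python (outside Pre_)
      | some (k, r) => d.getD (String.ofList k) "?" :: evalLoopA d r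
    else String.ofList [c] :: evalLoopA d cs
termination_by l => l.length
decreasing_by
  · have := evalScanA_length cs k r h
    simp only [List.length_cons]
    omega
  · simp

def evaluate (s : String) (knowledge : List (List String)) : String :=
  PySem.Str.join "" (evalLoopA (evalBuildA knowledge) s.toList)

-- ===== PORT B =====
-- lookup = dict(knowledge); a row of length ≠ 2 raises (outside Pre_)
def evalBuildB (knowledge : List (List String)) : PySem.Dict String String :=
  knowledge.foldl (fun d row =>
    match row with
    | [k, v] => d.insert k v
    | _ => d) PySem.Dict.empty

-- the 'while True' loop over the rest of the string: open_ = s.find('(', i) splits the rest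
-- at the first '(' (takeWhile/dropWhile); close = s.index(')', open_) likewise after the '('.
def evalLoopB (d : PySem.Dict String String) (t : List Char) : List String :=
  match hr : t.dropWhile (· ≠ '(') with
  | [] => [String.ofList (t.takeWhile (· ≠ '('))]      -- find returned -1: append s[i:], break
  | _ :: afterOpen =>
    match hc : afterOpen.dropWhile (· ≠ ')') with
    | [] => [String.ofList (t.takeWhile (· ≠ '('))]    -- ValueError from index() in Python (outside Pre_)
    | _ :: afterClose =>
      String.ofList (t.takeWhile (· ≠ '(')) ::
        d.getD (String.ofList (afterOpen.takeWhile (· ≠ ')'))) "?" ::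
        evalLoopB d afterClose
termination_by t.length
decreasing_by
  have l1 : (t.dropWhile (· ≠ '(')).length ≤ t.length := List.length_dropWhile_le _ t
  have l2 : (afterOpen.dropWhile (· ≠ ')')).length ≤ afterOpen.length := List.length_dropWhile_le _ afterOpen
  rw [hr, List.length_cons] at l1
  rw [hc, List.length_cons] at l2
  omega

def evaluate_alt (s : String) (knowledge : List (List String)) : String :=
  PySem.Str.join "" (evalLoopB (evalBuildB knowledge) s.toList)

-- ===== PRECONDITION & SPEC =====
-- Pre_ excludes exactly the inputs on which Python A raises: a knowledge row that is not a
-- [key, value] pair (ValueError while unpacking) and a '(' in s with no ')' anywhere after it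
-- (the inner scan runs off the end of s: IndexError).
def Pre_evaluate (s : String) (knowledge : List (List String)) : Prop :=
  (∀ row ∈ knowledge, row.length = 2) ∧
  '(' ∉ s.toList.reverse.takeWhile (· ≠ ')')
instance (s : String) (knowledge : List (List String)) : Decidable (Pre_evaluate s knowledge) := by
  unfold Pre_evaluate; infer_instance

def pvWitness_evaluate : String × List (List String) :=
  ("hi (name), (x)!", [["name", "bob"]])

def Spec_evaluate (s : String) (knowledge : List (List String)) (out : String) : Prop := out = evaluate_alt s knowledge
instance (s : String) (knowledge : List (List String)) (out : String) : Decidable (Spec_evaluate s knowledge out) := by unfold Spec_evaluate; infer_instance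

-- ===== CLAIM (what is proved, stated in full; the proofs are below) =====
def Claim_equal_evaluate : Prop := ∀ (s : String) (knowledge : List (List String)), Dom_evaluate s knowledge → Pre_evaluate s knowledge → Spec_evaluate s knowledge (evaluate s knowledge)

-- ===== LEMMAS AND PROOFS =====

-- 'every "(" is followed by some ")"': the invariant form of Pre_ used by the induction
def GoodStr (l : List Char) : Prop :=
  ∀ pre post : List Char, l = pre ++ '(' :: post → ')' ∈ post

theorem takeWhile_append_all {α : Type} (p : α → Bool) (a b : List α)
    (h : ∀ x ∈ a, p x = true) : (a ++ b).takeWhile p = a ++ b.takeWhile p := by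
  induction a with
  | nil => simp
  | cons c cs ih =>
    have hc := h c (by simp)
    have ht := ih (fun x hx => h x (by simp [hx]))
    simp [hc, ht]

theorem pre_goodStr (l : List Char) (h : '(' ∉ l.reverse.takeWhile (· ≠ ')')) : GoodStr l := by
  intro pre post heq
  by_contra hmem
  apply h
  rw [heq]
  have hrev : (pre ++ '(' :: post).reverse = post.reverse ++ '(' :: pre.reverse := by simp
  rw [hrev, takeWhile_append_all _ post.reverse _ ?_]
  · simp
  · intro x hx
    simp only [List.mem_reverse] at hx
    simp only [decide_eq_true_eq]
    rintro rfl
    exact hmem hx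

theorem goodStr_suffix (a t : List Char) (h : GoodStr (a ++ t)) : GoodStr t := by
  intro pre post heq
  exact h (a ++ pre) post (by rw [heq, List.append_assoc])

theorem dropWhile_head_false {α : Type} (p : α → Bool) :
    ∀ (l : List α) (x : α) (t : List α), l.dropWhile p = x :: t → p x = false := by
  intro l
  induction l with
  | nil => intro x t h; simp [List.dropWhile] at h
  | cons c cs ih =>
    intro x t h
    rw [List.dropWhile_cons] at h
    by_cases hp : p c = true
    · rw [if_pos hp] at h; exact ih _ _ h
    · rw [if_neg hp] at h
      cases h
      simpa using hp

-- equation lemmas for the two loop ports in the cases the induction reaches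
theorem evalLoopA_open (d : PySem.Dict String String) (cs k r : List Char)
    (h : evalScanA cs = some (k, r)) :
    evalLoopA d ('(' :: cs) = d.getD (String.ofList k) "?" :: evalLoopA d r := by
  rw [evalLoopA, if_pos rfl]
  split
  · rename_i heq; rw [h] at heq; cases heq
  · rename_i k' r' heq
    rw [h] at heq
    cases heq
    rfl

theorem evalLoopB_nil (d : PySem.Dict String String) (t : List Char)
    (hr : t.dropWhile (· ≠ '(') = []) :
    evalLoopB d t = [String.ofList (t.takeWhile (· ≠ '('))] := by
  rw [evalLoopB]
  split
  · rfl
  · rename_i x afterOpen heq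
    rw [hr] at heq
    cases heq

theorem evalLoopB_step (d : PySem.Dict String String) (t afterOpen r : List Char)
    (hr : t.dropWhile (· ≠ '(') = '(' :: afterOpen)
    (hc : afterOpen.dropWhile (· ≠ ')') = ')' :: r) :
    evalLoopB d t = String.ofList (t.takeWhile (· ≠ '(')) ::
      d.getD (String.ofList (afterOpen.takeWhile (· ≠ ')'))) "?" :: evalLoopB d r := by
  rw [evalLoopB]
  split
  · rename_i heq; rw [hr] at heq; cases heq
  · rename_i x afterOpen' heq
    rw [hr] at heq
    cases heq
    split
    · rename_i heq2; rw [hc] at heq2; cases heq2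
    · rename_i y r' heq2
      rw [hc] at heq2
      cases heq2
      rfl

-- the joined output at the List Char level
def evalJ (parts : List String) : List Char := (parts.map String.toList).flatten

theorem evalJ_cons (s : String) (ps : List String) : evalJ (s :: ps) = s.toList ++ evalJ ps := rfl

theorem evalScanA_of_mem (cs : List Char) (h : ')' ∈ cs) :
    ∃ r, cs.dropWhile (· ≠ ')') = ')' :: r ∧
      evalScanA cs = some (cs.takeWhile (· ≠ ')'), r) := by
  induction cs with
  | nil => simp at h
  | cons c cs ih =>
    by_cases hc : c = ')'
    · subst hc
      refine ⟨cs, ?_, ?_⟩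
      · rw [List.dropWhile_cons, if_neg (by simp)]
      · rw [evalScanA, if_pos rfl, List.takeWhile_cons, if_neg (by simp)]
    · have hmem : ')' ∈ cs := by
        rcases List.mem_cons.mp h with h1 | h1
        · exact absurd h1.symm hc
        · exact h1
      obtain ⟨r, hdrop, hscan⟩ := ih hmem
      refine ⟨r, ?_, ?_⟩
      · rw [List.dropWhile_cons, if_pos (by simp [hc]), hdrop]
      · rw [evalScanA, if_neg hc, hscan, List.takeWhile_cons, if_pos (by simp [hc])]

theorem evalLoopA_prefix (d : PySem.Dict String String) (a t : List Char) (h : '(' ∉ a) :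
    evalJ (evalLoopA d (a ++ t)) = a ++ evalJ (evalLoopA d t) := by
  induction a with
  | nil => simp
  | cons c cs ih =>
    have hc : c ≠ '(' := fun hh => h (hh ▸ List.mem_cons_self ..)
    rw [List.cons_append, evalLoopA, if_neg hc, evalJ_cons,
      ih (fun hm => h (List.mem_cons_of_mem _ hm))]
    simp

theorem main_lemma (d : PySem.Dict String String) :
    ∀ (n : Nat) (l : List Char), l.length ≤ n → GoodStr l →
      evalJ (evalLoopA d l) = evalJ (evalLoopB d l) := by
  intro n
  induction n with
  | zero =>
    intro l hl _
    have : l = [] := List.eq_nil_of_length_eq_zero (Nat.le_zero.mp hl)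
    subst this
    simp [evalLoopA, evalLoopB, evalJ]
  | succ n ih =>
    intro l hl hg
    have hsplit : l.takeWhile (· ≠ '(') ++ l.dropWhile (· ≠ '(') = l :=
      List.takeWhile_append_dropWhile
    have hpre_no : '(' ∉ l.takeWhile (· ≠ '(') := by
      intro hm
      have := List.mem_takeWhile_imp hm
      simp at this
    cases hr : l.dropWhile (· ≠ '(') with
    | nil =>
      rw [evalLoopB_nil d l hr]
      rw [hr, List.append_nil] at hsplit
      conv_lhs => rw [← hsplit]
      rw [show (l.takeWhile (· ≠ '(')) = l.takeWhile (· ≠ '(') ++ ([] : List Char) by simp]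
      rw [evalLoopA_prefix d _ _ hpre_no]
      simp [evalLoopA, evalJ]
    | cons x afterOpen =>
      have hx : x = '(' := by
        have h2 := dropWhile_head_false _ l x afterOpen hr
        simpa using h2
      subst hx
      have hmem : ')' ∈ afterOpen := by
        refine hg (l.takeWhile (· ≠ '(')) afterOpen ?_
        rw [← hr]
        exact hsplit.symm
      obtain ⟨r, hdrop, hscan⟩ := evalScanA_of_mem afterOpen hmem
      have hlen1 : afterOpen.length < l.length := by
        have l1 : (l.dropWhile (· ≠ '(')).length ≤ l.length := List.length_dropWhile_le _ l
        rw [hr, List.length_cons] at l1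
        omega
      have hlenr : r.length < afterOpen.length := by
        have l2 : (afterOpen.dropWhile (· ≠ ')')).length ≤ afterOpen.length := List.length_dropWhile_le _ afterOpen
        rw [hdrop, List.length_cons] at l2
        omega
      have hgr : GoodStr r := by
        apply goodStr_suffix (l.takeWhile (· ≠ '(') ++ '(' :: afterOpen.takeWhile (· ≠ ')') ++ [')'])
        have heq : l.takeWhile (· ≠ '(') ++ '(' :: afterOpen.takeWhile (· ≠ ')') ++ [')'] ++ r = l := by
          conv_rhs => rw [← hsplit, hr]
          simp only [List.append_assoc, List.cons_append, List.nil_append,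
            List.append_cancel_left_eq, List.cons.injEq, true_and]
          rw [← hdrop]
          exact List.takeWhile_append_dropWhile
        rw [heq]
        exact hg
      rw [evalLoopB_step d l afterOpen r hr hdrop]
      conv_lhs => rw [← hsplit, hr]
      rw [evalLoopA_prefix d _ _ hpre_no, evalLoopA_open d afterOpen _ r hscan]
      rw [evalJ_cons, evalJ_cons, evalJ_cons]
      rw [ih r (by omega) hgr]
      simp

theorem join_eq_evalJ (parts : List String) : PySem.Str.join "" parts = String.ofList (evalJ parts) := by
  apply String.toList_inj.mp
  rw [PySem.Str.toList_join]
  simp only [String.toList_ofList, PySem.Chars.join]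
  show List.intercalate [] (parts.map String.toList) = evalJ parts
  unfold evalJ
  generalize parts.map String.toList = xs
  induction xs with
  | nil => simp [List.intercalate, List.intersperse]
  | cons a t ih => cases t <;> simp_all [List.intercalate, List.intersperse]

-- ===== VERDICT (by name: the statement is the Claim_ definition above) =====
theorem evaluate_spec : Claim_equal_evaluate := by
  intro s knowledge _ hpre
  unfold Spec_evaluate evaluate evaluate_alt
  rw [join_eq_evalJ, join_eq_evalJ]
  have hb : evalBuildB = evalBuildA := rfl
  rw [hb]
  congr 1
  exact main_lemma (evalBuildA knowledge) s.toList.length s.toList le_rfl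
    (pre_goodStr _ hpre.2)
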